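-- pv_equiv track=rewrite | github.com/andreoppenheimer/ENGER | helper_functions_dictionaries.py | l_velarisation
-- ===== SOURCE A (Python) =====
-- def l_velarisation(word):
--     velarised_dict = {"l": "ɫ"}
--     syll_count = 0
--     result = []
--
--     for i in range(len(word)):
--         char = word[i]
--         if char == ".":
--             syll_count += 1
--         if syll_count >= 3 and char == "l":
--             result.append(velarised_dict["l"])
--         else:
--             result.append(char)
--     return result
-- ===== SOURCE B (Python) =====
-- def l_velarisation(word):
--     dots = [i for i, c in enumerate(word) if c == "."]
--     if len(dots) < 3:
--         return list(word)
--     split = dots[2] + 1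
--     return list(word[:split]) + ["\u026b" if c == "l" else c for c in word[split:]]
-- ===== Notes on version B (the rewrite author's own statement) =====
-- stated objective: simpler
-- what changed: Replaces A's single-pass loop carrying a syllable counter and conditional append with a split-then-map decomposition: collect the dot positions by comprehension, copy the prefix up to and including the third dot unchanged, and map only the suffix through the velarisation substitution.
import Mathlib
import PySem

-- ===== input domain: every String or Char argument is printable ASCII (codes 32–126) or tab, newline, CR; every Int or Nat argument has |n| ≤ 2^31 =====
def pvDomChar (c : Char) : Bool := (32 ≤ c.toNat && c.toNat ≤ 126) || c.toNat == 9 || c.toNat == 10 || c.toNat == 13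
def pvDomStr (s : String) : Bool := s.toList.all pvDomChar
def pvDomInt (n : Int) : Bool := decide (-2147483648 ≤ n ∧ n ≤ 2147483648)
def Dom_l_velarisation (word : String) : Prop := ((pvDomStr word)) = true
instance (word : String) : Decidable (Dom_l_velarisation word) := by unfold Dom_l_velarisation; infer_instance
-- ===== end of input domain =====

-- B replaces A's single-pass counter loop with a split-then-map decomposition (collect dot
-- positions, copy the prefix through the third dot, velarise only the suffix); objective: simpler.


-- ===== PORT A =====
-- the one-entry dict lookup velarised_dict["l"] is inlined to its value "ɫ" (the key is always present)
-- the loop body, named (state = (syll_count, result))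
def pvStepA (st : Int × List String) (char : Char) : Int × List String :=
  let syll := if char = '.' then st.1 + 1 else st.1
  if 3 ≤ syll ∧ char = 'l' then (syll, st.2 ++ ["ɫ"])
  else (syll, st.2 ++ [char.toString])

def l_velarisation (word : String) : List String :=
  (word.toList.foldl pvStepA (0, [])).2

-- ===== PORT B =====
def l_velarisation_alt (word : String) : List String :=
  let cs := word.toList
  let dots := ((PySem.List.enumerate cs).filter (fun p => p.2 = '.')).map Prod.fst
  match dots[2]? with
  | none => cs.map Char.toString
  | some d =>
      (PySem.List.slice cs none (some (d + 1))).map Char.toString ++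
      (PySem.List.slice cs (some (d + 1)) none).map
        (fun c => if c = 'l' then "ɫ" else c.toString)

-- ===== PRECONDITION & SPEC =====
def Spec_l_velarisation (word : String) (out : List String) : Prop := out = l_velarisation_alt word
instance (word : String) (out : List String) : Decidable (Spec_l_velarisation word out) := by unfold Spec_l_velarisation; infer_instance

-- ===== CLAIM (what is proved, stated in full; the proofs are below) =====
def Claim_equal_l_velarisation : Prop := ∀ (word : String), Dom_l_velarisation word → Spec_l_velarisation word (l_velarisation word)

-- ===== LEMMAS AND PROOFS =====

/-- A's per-character decision, as a structural recursion on the char list. -/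
def pvGoA (n : Int) : List Char → List String
  | [] => []
  | c :: cs =>
    let n' := if c = '.' then n + 1 else n
    (if 3 ≤ n' ∧ c = 'l' then "ɫ" else c.toString) :: pvGoA n' cs

/-- velarise one char -/
def pvVelar (c : Char) : String := if c = 'l' then "ɫ" else c.toString

/-- B's shape as a recursion: copy until `n` dots have passed, then velarise. -/
def pvGoB : Nat → List Char → List String
  | 0, cs => cs.map pvVelar
  | _ + 1, [] => []
  | n + 1, c :: cs => c.toString :: pvGoB (if c = '.' then n else n + 1) cs

/-- dot positions starting at offset s -/
def pvDots (cs : List Char) (s : Int) : List Int :=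
  ((PySem.List.enumerate cs s).filter (fun p => p.2 = '.')).map Prod.fst

lemma pvDots_cons (c : Char) (cs : List Char) (s : Int) :
    pvDots (c :: cs) s = if c = '.' then s :: pvDots cs (s + 1) else pvDots cs (s + 1) := by
  simp only [pvDots, PySem.List.enumerate_cons, List.filter_cons]
  split_ifs with h <;> simp_all

lemma pvDots_shift (cs : List Char) (s : Int) :
    pvDots cs s = (pvDots cs 0).map (· + s) := by
  induction cs generalizing s with
  | nil => simp [pvDots]
  | cons c cs ih =>
    rw [pvDots_cons, pvDots_cons]
    simp only [zero_add]
    rw [ih (s + 1), ih 1]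
    split_ifs <;> simp [List.map_map, Function.comp_def] <;> exact fun a _ => by ring

lemma pvDots_nonneg (cs : List Char) : ∀ d ∈ pvDots cs 0, 0 ≤ d := by
  induction cs with
  | nil => simp [pvDots]
  | cons c cs ih =>
    intro d hd
    rw [pvDots_cons] at hd
    simp only [zero_add] at hd
    rw [pvDots_shift cs 1] at hd
    split_ifs at hd with h
    · rcases List.mem_cons.1 hd with h0 | h1
      · omega
      · rcases List.mem_map.1 h1 with ⟨e, he, rfl⟩
        have := ih e he; omega
    · rcases List.mem_map.1 hd with ⟨e, he, rfl⟩
      have := ih e he; omega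

/-- unrolling A's fold -/
lemma pvFoldA (cs : List Char) : ∀ (n : Int) (acc : List String),
    (cs.foldl pvStepA (n, acc)).2 = acc ++ pvGoA n cs := by
  induction cs with
  | nil => intro n acc; simp [pvGoA]
  | cons c cs ih =>
    intro n acc
    simp only [List.foldl_cons, pvGoA]
    by_cases hl : c = 'l'
    · subst hl
      by_cases h3 : (3 : Int) ≤ n <;> simp [pvStepA, h3, ih]
    · simp [pvStepA, hl, ih]

/-- once the counter has reached 3, A velarises everything -/
lemma pvGoA_ge3 (cs : List Char) : ∀ n : Int, 3 ≤ n → pvGoA n cs = cs.map pvVelar := by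
  induction cs with
  | nil => intro n _; simp [pvGoA]
  | cons c cs ih =>
    intro n h3
    by_cases hdot : c = '.'
    · have h3' : (3 : Int) ≤ n + 1 := by omega
      have hl : ¬ c = 'l' := by simp [hdot]
      simp [pvGoA, pvVelar, hdot, h3', ih _ h3']
    · by_cases hl : c = 'l'
      · simp [pvGoA, pvVelar, hdot, hl, h3, ih _ h3]
      · simp [pvGoA, pvVelar, hdot, hl, h3, ih _ h3]

/-- A's counter at 3 - k behaves like B waiting for k more dots -/
lemma pvGoA_eq_goB (cs : List Char) : ∀ k : Nat, k ≤ 3 → pvGoA (3 - (k : Int)) cs = pvGoB k cs := by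
  induction cs with
  | nil =>
    intro k _
    cases k with
    | zero => simp [pvGoA, pvGoB]
    | succ m => simp [pvGoA, pvGoB]
  | cons c cs ih =>
    intro k hk
    cases k with
    | zero => exact pvGoA_ge3 (c :: cs) _ (by norm_num)
    | succ m =>
      have hn : ¬ 3 ≤ (3 - ((m + 1 : Nat) : Int)) := by push_cast; omega
      by_cases hdot : c = '.'
      · subst hdot
        simp [pvGoA, pvGoB]
        rw [show (3 : Int) - ((m : Int) + 1) + 1 = 3 - (m : Int) from by ring]
        exact ih m (by omega)
      · simp [pvGoA, pvGoB, hdot]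
        rw [show (3 : Int) - ((m : Int) + 1) = 3 - ((m + 1 : Nat) : Int) from by push_cast; ring]
        exact ih (m + 1) hk

/-- pvGoB (n+1) expressed through the n-th dot position -/
lemma pvGoB_eq_split (cs : List Char) : ∀ n : Nat,
    pvGoB (n + 1) cs =
      match (pvDots cs 0)[n]? with
      | none => cs.map Char.toString
      | some d => (cs.take (d.toNat + 1)).map Char.toString ++ (cs.drop (d.toNat + 1)).map pvVelar := by
  induction cs with
  | nil => intro n; simp [pvGoB, pvDots]
  | cons c cs ih =>
    intro n
    rw [pvDots_cons]
    simp only [zero_add]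
    rw [pvDots_shift cs 1]
    by_cases hdot : c = '.'
    · subst hdot
      cases n with
      | zero => simp [pvGoB]
      | succ m =>
        cases hd : (pvDots cs 0)[m]? with
        | none => simp [pvGoB, ih m, hd]
        | some d =>
          have hdn : 0 ≤ d := pvDots_nonneg cs d (List.mem_of_getElem? hd)
          have ht : (d + 1).toNat = d.toNat + 1 := by omega
          simp [pvGoB, ih m, hd, ht]
    · cases hd : (pvDots cs 0)[n]? with
      | none => simp [pvGoB, hdot, ih n, hd]
      | some d =>
        have hdn : 0 ≤ d := pvDots_nonneg cs d (List.mem_of_getElem? hd)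
        have ht : (d + 1).toNat = d.toNat + 1 := by omega
        simp [pvGoB, hdot, ih n, hd, ht]

-- ===== VERDICT (by name: the statement is the Claim_ definition above) =====
theorem l_velarisation_spec : Claim_equal_l_velarisation := by
  intro word _
  unfold Spec_l_velarisation
  have hA : l_velarisation word = pvGoA 0 word.toList := by
    simp [l_velarisation, pvFoldA word.toList 0 []]
  have h03 : (0 : Int) = 3 - ((3 : Nat) : Int) := by norm_num
  rw [hA, h03, pvGoA_eq_goB word.toList 3 (le_refl 3), pvGoB_eq_split word.toList 2]
  show _ = l_velarisation_alt word
  simp only [l_velarisation_alt]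
  have hdots : ((PySem.List.enumerate word.toList).filter (fun p => p.2 = '.')).map Prod.fst
      = pvDots word.toList 0 := rfl
  rw [hdots]
  cases hd : (pvDots word.toList 0)[2]? with
  | none => simp
  | some d =>
    have hdn : 0 ≤ d := pvDots_nonneg _ d (List.mem_of_getElem? hd)
    have hd1 : d + 1 = ((d.toNat + 1 : Nat) : Int) := by omega
    simp only [hd1, PySem.List.slice_to_natCast, PySem.List.slice_from_natCast]
    simp [Char.toString]
    rfl
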